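-- pv_equiv track=rewrite | github.com/TeamW-P/RNABayesPairing2 | core/src/validation_3dmotif.py | computeCountAndLists
-- ===== SOURCE A (Python) =====
-- def computeCountAndLists(s):
--     # WARNING: Use of function count(s,'UU') returns 1 on word UUU
--     # since it apparently counts only nonoverlapping words UU
--     # For this reason, we work with the indices.
--
--     # Initialize lists and mono- and dinucleotide dictionaries
--     List = {}  # List is a dictionary of lists
--     List['A'] = [];
--     List['C'] = [];
--     List['G'] = [];
--     List['U'] = [];
--     List['.'] = []
--     nuclList = ["A", "C", "G", "U", "."]
--     s = s.upper()
--     nuclCnt = {}  # empty dictionary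
--     dinuclCnt = {}  # empty dictionary
--     for x in nuclList:
--         nuclCnt[x] = 0
--         dinuclCnt[x] = {}
--         for y in nuclList:
--             dinuclCnt[x][y] = 0
--
--     # Compute count and lists
--     nuclCnt[s[0]] = 1
--     nuclTotal = 1
--     dinuclTotal = 0
--     for i in range(len(s) - 1):
--         x = s[i];
--         y = s[i + 1]
--         List[x].append(y)
--         nuclCnt[y] += 1;
--         nuclTotal += 1
--         dinuclCnt[x][y] += 1;
--         dinuclTotal += 1
--     assert (nuclTotal == len(s))
--     assert (dinuclTotal == len(s) - 1)
--     return nuclCnt, dinuclCnt, List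
-- ===== SOURCE B (Python) =====
-- def computeCountAndLists(s):
--     # Different decomposition: build the successor table first, then derive the
--     # dinucleotide counts bucket-by-bucket and the nucleotide counts as column sums.
--     nuclList = ["A", "C", "G", "U", "."]
--     s = s.upper()
--     List = {x: [] for x in nuclList}
--     nuclCnt = {x: 0 for x in nuclList}
--     dinuclCnt = {x: {y: 0 for y in nuclList} for x in nuclList}
--
--     # seed the first nucleotide (as A does: plain assignment)
--     nuclCnt[s[0]] = 1
--
--     # pass 1: successor lists only
--     for x, y in zip(s, s[1:]):
--         List[x].append(y)
--
--     # pass 2: dinucleotide counts from the buckets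
--     for x in nuclList:
--         for y in List[x]:
--             dinuclCnt[x][y] += 1
--
--     # pass 3: nucleotide counts as column sums of the dinucleotide table
--     for y in nuclList:
--         nuclCnt[y] += sum(dinuclCnt[x][y] for x in nuclList)
--
--     return nuclCnt, dinuclCnt, List
-- ===== Notes on version B (the rewrite author's own statement) =====
-- stated objective: alternative
-- what changed: B replaces A's single combined pass (which updates nucleotide counts, dinucleotide counts and successor lists at every position) by a staged decomposition: one pass builds only the successor table, then the dinucleotide counts are derived bucket-by-bucket from that table, and the nucleotide counts are obtained as column sums of the dinucleotide table plus the seeded first nucleotide.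
import Mathlib
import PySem

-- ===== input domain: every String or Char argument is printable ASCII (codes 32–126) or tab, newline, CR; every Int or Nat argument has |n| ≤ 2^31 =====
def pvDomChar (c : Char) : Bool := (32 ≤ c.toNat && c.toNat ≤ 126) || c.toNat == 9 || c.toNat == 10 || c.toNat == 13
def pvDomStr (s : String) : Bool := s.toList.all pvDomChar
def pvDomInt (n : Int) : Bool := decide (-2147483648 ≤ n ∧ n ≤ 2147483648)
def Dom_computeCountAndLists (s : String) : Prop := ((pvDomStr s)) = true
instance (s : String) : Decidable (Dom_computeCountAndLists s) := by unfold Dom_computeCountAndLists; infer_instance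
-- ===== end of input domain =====

-- B replaces A's single combined counting pass by a staged decomposition (successor table first,
-- then dinucleotide counts from its buckets, then nucleotide counts as column sums); same values, same cost.


-- Python's s[i] is a one-character string
def pvKey (c : Char) : String := String.ofList [c]

def pvNuclList : List String := ["A", "C", "G", "U", "."]

-- ===== PORT A =====
-- transliteration of A; the two asserts always hold and nuclTotal/dinuclTotal feed only them,
-- so they are not part of the returned value
def computeCountAndLists (s : String) :
    (List (String × Int)) × (List (String × List (String × Int))) × (List (String × List String)) :=
  -- List['A'] = []; … ; List['.'] = []
  let Lst0 : PySem.Dict String (List String) :=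
    ((((PySem.Dict.empty.insert "A" ([] : List String)).insert "C" []).insert "G" []).insert "U" []).insert "." []
  -- s = s.upper()
  let cs : List Char := PySem.Chars.upper s.toList
  -- for x in nuclList: nuclCnt[x] = 0; dinuclCnt[x] = {}; for y in nuclList: dinuclCnt[x][y] = 0
  let init : PySem.Dict String Int × PySem.Dict String (PySem.Dict String Int) :=
    pvNuclList.foldl
      (fun st x =>
        (st.1.insert x 0,
         st.2.insert x (pvNuclList.foldl (fun m y => m.insert y 0) PySem.Dict.empty)))
      (PySem.Dict.empty, PySem.Dict.empty)
  -- nuclCnt[s[0]] = 1  (an empty s is an IndexError: excluded by Pre_)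
  let nuclCnt1 := init.1.insert (pvKey ((PySem.List.pyGet? cs 0).getD ' ')) 1
  -- for i in range(len(s)-1): x = s[i]; y = s[i+1]; List[x].append(y); nuclCnt[y] += 1; dinuclCnt[x][y] += 1
  -- (a missing key is a KeyError: excluded by Pre_, so Dict.modify's default is never used there)
  let st :=
    (PySem.List.pyRange 0 ((cs.length : Int) - 1) 1).foldl
      (fun (st : PySem.Dict String (List String) × PySem.Dict String Int ×
                 PySem.Dict String (PySem.Dict String Int)) i =>
        let x := pvKey (PySem.List.pyGetD cs i ' ')
        let y := pvKey (PySem.List.pyGetD cs (i + 1) ' ')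
        (st.1.modify x [] (· ++ [y]),
         st.2.1.modify y 0 (· + 1),
         st.2.2.modify x PySem.Dict.empty (fun m => m.modify y 0 (· + 1))))
      (Lst0, nuclCnt1, init.2)
  (st.2.1.items, st.2.2.items.map (fun p => (p.1, p.2.items)), st.1.items)

-- ===== PORT B =====
-- transliteration of Source B: successor table first, then dinucleotide counts per bucket,
-- then nucleotide counts as column sums added to the seeded first nucleotide
def computeCountAndLists_alt (s : String) :
    (List (String × Int)) × (List (String × List (String × Int))) × (List (String × List String)) :=
  -- s = s.upper()
  let cs : List Char := PySem.Chars.upper s.toList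
  -- List = {x: [] for x in nuclList} ; nuclCnt = {x: 0 for x in nuclList} ; dinuclCnt = {x: {y: 0 …} …}
  let Lst0 : PySem.Dict String (List String) :=
    pvNuclList.foldl (fun d x => d.insert x ([] : List String)) PySem.Dict.empty
  let nuclCnt0 : PySem.Dict String Int :=
    pvNuclList.foldl (fun d x => d.insert x 0) PySem.Dict.empty
  let dinuclCnt0 : PySem.Dict String (PySem.Dict String Int) :=
    pvNuclList.foldl
      (fun d x => d.insert x (pvNuclList.foldl (fun m y => m.insert y 0) PySem.Dict.empty))
      PySem.Dict.empty
  -- nuclCnt[s[0]] = 1  (an empty s is an IndexError: excluded by Pre_)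
  let nuclCnt1 := nuclCnt0.insert (pvKey ((PySem.List.pyGet? cs 0).getD ' ')) 1
  -- pass 1: for x, y in zip(s, s[1:]): List[x].append(y)
  let Lst := (cs.zip cs.tail).foldl
    (fun d p => d.modify (pvKey p.1) [] (· ++ [pvKey p.2])) Lst0
  -- pass 2: for x in nuclList: for y in List[x]: dinuclCnt[x][y] += 1
  let dinuclCnt := pvNuclList.foldl
    (fun d x => (Lst.getD x []).foldl
      (fun d y => d.modify x PySem.Dict.empty (fun m => m.modify y 0 (· + 1))) d)
    dinuclCnt0
  -- pass 3: for y in nuclList: nuclCnt[y] += sum(dinuclCnt[x][y] for x in nuclList)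
  let nuclCnt := pvNuclList.foldl
    (fun d y => d.modify y 0
      (· + (pvNuclList.map (fun x => (dinuclCnt.getD x PySem.Dict.empty).getD y 0)).sum))
    nuclCnt1
  (nuclCnt.items, dinuclCnt.items.map (fun p => (p.1, p.2.items)), Lst.items)

-- ===== PRECONDITION & SPEC =====
-- Pre_ excludes exactly the inputs on which the Python A raises: the empty string (IndexError at s[0])
-- and strings of length ≥ 2 containing a character other than A/C/G/U/. after upper-casing
-- (KeyError in the pair loop).  On every other input A returns normally and B matches it.
def Pre_computeCountAndLists (s : String) : Prop :=
  s.toList ≠ [] ∧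
    ((PySem.Chars.upper s.toList).length = 1 ∨
      (PySem.Chars.upper s.toList).all
        (fun c => decide (c ∈ (['A', 'C', 'G', 'U', '.'] : List Char))) = true)
instance (s : String) : Decidable (Pre_computeCountAndLists s) := by
  unfold Pre_computeCountAndLists; infer_instance

def pvWitness_computeCountAndLists : String := "acgu.ACGU"

def Spec_computeCountAndLists (s : String)
    (out : (List (String × Int)) × (List (String × List (String × Int))) × (List (String × List String))) :
    Prop := out = computeCountAndLists_alt s
instance (s : String)
    (out : (List (String × Int)) × (List (String × List (String × Int))) × (List (String × List String))) :
    Decidable (Spec_computeCountAndLists s out) := by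
  unfold Spec_computeCountAndLists; infer_instance

-- ===== CLAIM (what is proved, stated in full; the proofs are below) =====
def Claim_equal_computeCountAndLists : Prop :=
  ∀ (s : String), Dom_computeCountAndLists s → Pre_computeCountAndLists s →
    Spec_computeCountAndLists s (computeCountAndLists s)

-- ===== LEMMAS AND PROOFS =====

-- canonical forms of the intermediate structures, as functions of the upper-cased character list
def pvP (cs : List Char) : List (String × String) :=
  (cs.zip cs.tail).map (fun p => (pvKey p.1, pvKey p.2))

def pvLst0 : PySem.Dict String (List String) :=
  pvNuclList.foldl (fun d x => d.insert x ([] : List String)) PySem.Dict.empty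

def pvNuclCnt0 : PySem.Dict String Int :=
  pvNuclList.foldl (fun d x => d.insert x 0) PySem.Dict.empty

def pvDinucl0 : PySem.Dict String (PySem.Dict String Int) :=
  pvNuclList.foldl
    (fun d x => d.insert x (pvNuclList.foldl (fun m y => m.insert y 0) PySem.Dict.empty))
    PySem.Dict.empty

def pvLst (cs : List Char) : PySem.Dict String (List String) :=
  (pvP cs).foldl (fun d p => d.modify p.1 [] (· ++ [p.2])) pvLst0

def pvN1 (cs : List Char) : PySem.Dict String Int :=
  pvNuclCnt0.insert (pvKey ((PySem.List.pyGet? cs 0).getD ' ')) 1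

def pvNA (cs : List Char) : PySem.Dict String Int :=
  ((pvP cs).map (·.2)).foldl (fun d y => d.modify y 0 (· + 1)) (pvN1 cs)

def pvDA (cs : List Char) : PySem.Dict String (PySem.Dict String Int) :=
  (pvP cs).foldl
    (fun d p => d.modify p.1 PySem.Dict.empty (fun m => m.modify p.2 0 (· + 1))) pvDinucl0

def pvQ (cs : List Char) : List (String × String) :=
  pvNuclList.flatMap (fun x => ((pvLst cs).getD x []).map (fun y => (x, y)))

def pvDB (cs : List Char) : PySem.Dict String (PySem.Dict String Int) :=
  (pvQ cs).foldl
    (fun d p => d.modify p.1 PySem.Dict.empty (fun m => m.modify p.2 0 (· + 1))) pvDinucl0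

def pvNB (cs : List Char) : PySem.Dict String Int :=
  pvNuclList.foldl
    (fun d y => d.modify y 0
      (· + (pvNuclList.map (fun x => ((pvDB cs).getD x PySem.Dict.empty).getD y 0)).sum))
    (pvN1 cs)

-- the valid-pairs hypothesis all proofs use
def pvOK (cs : List Char) : Prop :=
  ∀ p ∈ pvP cs, p.1 ∈ pvNuclList ∧ p.2 ∈ pvNuclList

lemma pv_map_range_pairs (cs : List Char) :
    (PySem.List.pyRange 0 ((cs.length : Int) - 1) 1).map
        (fun i => (PySem.List.pyGetD cs i ' ', PySem.List.pyGetD cs (i + 1) ' '))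
      = cs.zip cs.tail := by
  rw [PySem.List.pyRange_one, List.map_map]
  apply List.ext_getElem
  · simp [List.length_zip]
  · intro i h1 h2
    simp only [List.getElem_map, List.getElem_range, Function.comp_apply, List.getElem_zip,
      List.getElem_tail]
    have hi : i < cs.length := by
      have := h2; simp [List.length_zip] at this; omega
    have hi1 : i + 1 < cs.length := by
      have := h2; simp [List.length_zip] at this; omega
    refine Prod.ext ?_ ?_
    · show PySem.List.pyGetD cs (0 + (i : Nat)) ' ' = cs[i]
      rw [show ((0 : Int) + (i : Nat)) = ((i : Nat) : Int) by ring]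
      rw [PySem.List.pyGetD_natCast, List.getD_eq_getElem?_getD, List.getElem?_eq_getElem hi]
      rfl
    · show PySem.List.pyGetD cs (0 + (i : Nat) + 1) ' ' = cs[i + 1]
      rw [show ((0 : Int) + (i : Nat) + 1) = ((i + 1 : Nat) : Int) by push_cast; ring]
      rw [PySem.List.pyGetD_natCast, List.getD_eq_getElem?_getD, List.getElem?_eq_getElem hi1]
      rfl

lemma pv_foldl_range_pairs {σ : Type} (cs : List Char) (f : σ → Char → Char → σ) (init : σ) :
    (PySem.List.pyRange 0 ((cs.length : Int) - 1) 1).foldl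
        (fun st i => f st (PySem.List.pyGetD cs i ' ') (PySem.List.pyGetD cs (i + 1) ' ')) init
      = (cs.zip cs.tail).foldl (fun st p => f st p.1 p.2) init := by
  rw [← pv_map_range_pairs cs, List.foldl_map]

lemma pv_foldl_triple {α β γ δ : Type} (l : List δ) (f : α → δ → α) (g : β → δ → β)
    (h : γ → δ → γ) (a : α) (b : β) (c : γ) :
    l.foldl (fun st p => (f st.1 p, g st.2.1 p, h st.2.2 p)) (a, b, c)
      = (l.foldl f a, l.foldl g b, l.foldl h c) := by
  induction l generalizing a b c with
  | nil => rfl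
  | cons p t ih => simp [List.foldl_cons, ih]

lemma pv_nested_restrict (P : List (String × String)) (d : PySem.Dict String (PySem.Dict String Int))
    (x : String) :
    (P.foldl (fun d p => d.modify p.1 PySem.Dict.empty (fun m => m.modify p.2 0 (· + 1))) d).getD
        x PySem.Dict.empty
      = ((P.filter (fun p => p.1 == x)).map (·.2)).foldl
          (fun m y => m.modify y 0 (· + 1)) (d.getD x PySem.Dict.empty) := by
  induction P generalizing d with
  | nil => rfl
  | cons p t ih =>
    rw [List.foldl_cons, ih, List.filter_cons]
    by_cases h : p.1 = x
    · simp only [h, beq_self_eq_true, if_pos, List.map_cons, List.foldl_cons]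
      rw [show (d.modify x PySem.Dict.empty fun m => m.modify p.2 0 (· + 1)).getD x PySem.Dict.empty
            = (d.getD x PySem.Dict.empty).modify p.2 0 (· + 1) from
          PySem.Dict.getD_modify_self d x PySem.Dict.empty _]
    · have hb : (p.1 == x) = false := beq_eq_false_iff_ne.mpr h
      simp only [hb, Bool.false_eq_true, if_neg, not_false_iff]
      rw [PySem.Dict.getD_modify_of_ne d PySem.Dict.empty _ (fun e => h e.symm)]

lemma pv_update_subset {s l : List String} (h : ∀ x ∈ l, x ∈ s) : PySem.Set.update s l = s := by
  rw [PySem.Set.update_eq_append_filter]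
  have hnil : List.filter (fun y => !PySem.Set.contains s y) (PySem.Set.ofList l) = [] := by
    rw [List.filter_eq_nil_iff]
    intro y hy
    simp only [Bool.not_eq_true', Bool.not_eq_false]
    exact (PySem.Set.contains_iff s y).mpr (h y ((PySem.Set.mem_ofList l y).mp hy))
  rw [hnil, List.append_nil]

lemma pv_getD_foldl_modify_addg (K : List String) (hK : K.Nodup) (g : String → Int)
    (d : PySem.Dict String Int) (v : String) :
    (K.foldl (fun d y => d.modify y 0 (· + g y)) d).getD v 0
      = d.getD v 0 + (if v ∈ K then g v else 0) := by
  induction K generalizing d with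
  | nil => simp
  | cons k t ih =>
    rcases List.nodup_cons.mp hK with ⟨hk, ht⟩
    rw [List.foldl_cons, ih ht]
    by_cases h : v = k
    · subst h
      rw [PySem.Dict.getD_modify_self]
      simp [hk]
    · rw [PySem.Dict.getD_modify_of_ne d 0 _ h]
      simp [h]

lemma pv_sum_indicator (K : List String) (hK : K.Nodup) (a : String) (c : Int) :
    (K.map (fun x => if x = a then c else 0)).sum = if a ∈ K then c else 0 := by
  induction K with
  | nil => simp
  | cons k t ih =>
    rcases List.nodup_cons.mp hK with ⟨hk, ht⟩
    simp only [List.map_cons, List.sum_cons, ih ht, List.mem_cons]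
    by_cases h : k = a
    · subst h; simp [hk]
    · simp [h, Ne.symm h]

lemma pv_sum_cnt2 (K : List String) (hK : K.Nodup) (P : List (String × String))
    (h : ∀ p ∈ P, p.1 ∈ K) (y : String) :
    (K.map (fun x => (((P.filter (fun p => p.1 == x)).map (·.2)).count y : Int))).sum
      = ((P.map (·.2)).count y : Int) := by
  induction P with
  | nil => simp
  | cons p t ih =>
    have hstep : ∀ x : String,
        ((((p :: t).filter (fun q => q.1 == x)).map (·.2)).count y : Int)
          = (((t.filter (fun q => q.1 == x)).map (·.2)).count y : Int)
            + (if x = p.1 then (if y = p.2 then (1 : Int) else 0) else 0) := by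
      intro x
      rw [List.filter_cons]
      by_cases hx : p.1 = x
      · have : (p.1 == x) = true := beq_iff_eq.mpr hx
        rw [if_pos this, List.map_cons, List.count_cons]
        rcases eq_or_ne y p.2 with hy | hy
        · simp [hy, hx.symm]
        · simp [hy, Ne.symm hy, hx.symm]
      · have : ¬ ((p.1 == x) = true) := by simp [hx]
        rw [if_neg this]
        have : ¬ x = p.1 := fun e => hx e.symm
        simp [this]
    rw [List.map_congr_left (fun x _ => hstep x), PySem.List.sum_map_add_int,
      ih (fun q hq => h q (List.mem_cons_of_mem p hq)),
      pv_sum_indicator K hK p.1 (if y = p.2 then (1 : Int) else 0)]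
    rw [if_pos (h p (List.mem_cons_self))]
    rw [List.map_cons, List.count_cons]
    rcases eq_or_ne y p.2 with hy | hy
    · simp [hy]
    · simp [hy, Ne.symm hy]

lemma pv_filter_flatMap_tag (K : List String) (hK : K.Nodup) (L : String → List String)
    (x : String) (hx : x ∈ K) :
    ((K.flatMap (fun x' => (L x').map (fun y => (x', y)))).filter (fun p => p.1 == x))
      = (L x).map (fun y => (x, y)) := by
  induction K with
  | nil => simp at hx
  | cons k t ih =>
    rcases List.nodup_cons.mp hK with ⟨hk, ht⟩
    rw [List.flatMap_cons, List.filter_append]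
    rcases List.mem_cons.mp hx with h | h
    · subst h
      have h1 : ((L x).map (fun y => (x, y))).filter (fun p => p.1 == x)
          = (L x).map (fun y => (x, y)) := by
        apply List.filter_eq_self.mpr
        intro p hp
        rcases List.mem_map.mp hp with ⟨y, _, rfl⟩
        simp
      have h2 : ((t.flatMap (fun x' => (L x').map (fun y => (x', y)))).filter
          (fun p => p.1 == x)) = [] := by
        rw [List.filter_eq_nil_iff]
        intro p hp
        rcases List.mem_flatMap.mp hp with ⟨x', hx', hpm⟩
        rcases List.mem_map.mp hpm with ⟨y, _, rfl⟩
        simp only [beq_iff_eq]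
        exact fun e => hk (e ▸ hx')
      rw [h1, h2, List.append_nil]
    · have hkx : k ≠ x := fun e => hk (e ▸ h)
      have h1 : ((L k).map (fun y => (k, y))).filter (fun p => p.1 == x) = [] := by
        rw [List.filter_eq_nil_iff]
        intro p hp
        rcases List.mem_map.mp hp with ⟨y, _, rfl⟩
        simp [hkx]
      rw [h1, List.nil_append, ih ht h]

-- the successor bucket of x, for x in the alphabet
lemma pv_Lst_getD (cs : List Char) (x : String) (hx : x ∈ pvNuclList) :
    (pvLst cs).getD x [] = ((pvP cs).filter (fun p => p.1 == x)).map (·.2) := by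
  unfold pvLst
  rw [PySem.Dict.getD_foldl_modify_append]
  have h0 : pvLst0.getD x [] = [] := by fin_cases hx <;> decide
  rw [h0, List.nil_append]

-- both dinucleotide tables have, at each alphabet key, the same bucket fold
lemma pv_DA_getD (cs : List Char) (x : String) :
    (pvDA cs).getD x PySem.Dict.empty
      = (((pvP cs).filter (fun p => p.1 == x)).map (·.2)).foldl
          (fun m y => m.modify y 0 (· + 1)) (pvDinucl0.getD x PySem.Dict.empty) := by
  unfold pvDA
  exact pv_nested_restrict (pvP cs) pvDinucl0 x

lemma pv_DB_getD (cs : List Char) (x : String) (hx : x ∈ pvNuclList) :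
    (pvDB cs).getD x PySem.Dict.empty
      = (((pvP cs).filter (fun p => p.1 == x)).map (·.2)).foldl
          (fun m y => m.modify y 0 (· + 1)) (pvDinucl0.getD x PySem.Dict.empty) := by
  unfold pvDB
  rw [pv_nested_restrict (pvQ cs) pvDinucl0 x]
  unfold pvQ
  rw [pv_filter_flatMap_tag pvNuclList (by decide) (fun x' => (pvLst cs).getD x' []) x hx]
  rw [List.map_map]
  have : ((fun x_1 => x_1.2) ∘ fun y => (x, y)) = (id : String → String) := rfl
  rw [this, List.map_id, pv_Lst_getD cs x hx]

lemma pv_DA_keys (cs : List Char) (hok : pvOK cs) : (pvDA cs).keys = pvNuclList := by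
  have h : (pvDA cs).keys
      = PySem.Set.update pvDinucl0.keys ((pvP cs).map (fun p => p.1)) := by
    unfold pvDA
    exact PySem.Dict.keys_foldl_modify_key (pvP cs) (fun p => p.1) PySem.Dict.empty
      (fun _ p => (fun m => m.modify p.2 0 (· + 1))) pvDinucl0
  rw [h, show pvDinucl0.keys = pvNuclList from by decide]
  apply pv_update_subset
  intro v hv
  rcases List.mem_map.mp hv with ⟨p, hp, rfl⟩
  exact (hok p hp).1

lemma pv_DB_keys (cs : List Char) : (pvDB cs).keys = pvNuclList := by
  have h : (pvDB cs).keys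
      = PySem.Set.update pvDinucl0.keys ((pvQ cs).map (fun p => p.1)) := by
    unfold pvDB
    exact PySem.Dict.keys_foldl_modify_key (pvQ cs) (fun p => p.1) PySem.Dict.empty
      (fun _ p => (fun m => m.modify p.2 0 (· + 1))) pvDinucl0
  rw [h, show pvDinucl0.keys = pvNuclList from by decide]
  apply pv_update_subset
  intro v hv
  rcases List.mem_map.mp hv with ⟨p, hp, rfl⟩
  rcases List.mem_flatMap.mp hp with ⟨x', hx', hpm⟩
  rcases List.mem_map.mp hpm with ⟨y, _, rfl⟩
  exact hx'

lemma pv_DA_eq_DB (cs : List Char) (hok : pvOK cs) : pvDA cs = pvDB cs := by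
  apply PySem.Dict.ext
  have hnodA : (pvDA cs).keys.Nodup := by
    unfold pvDA
    exact PySem.Dict.nodup_keys_foldl_modify_key (pvP cs) (fun p => p.1) PySem.Dict.empty
      (fun _ p => (fun m => m.modify p.2 0 (· + 1))) pvDinucl0 (by decide)
  have hnodB : (pvDB cs).keys.Nodup := by
    unfold pvDB
    exact PySem.Dict.nodup_keys_foldl_modify_key (pvQ cs) (fun p => p.1) PySem.Dict.empty
      (fun _ p => (fun m => m.modify p.2 0 (· + 1))) pvDinucl0 (by decide)
  rw [PySem.Dict.items_eq_map_keys _ hnodA PySem.Dict.empty,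
    PySem.Dict.items_eq_map_keys _ hnodB PySem.Dict.empty,
    pv_DA_keys cs hok, pv_DB_keys cs]
  apply List.map_congr_left
  intro x hx
  rw [pv_DA_getD cs x, pv_DB_getD cs x hx]

lemma pv_N1_nodup (cs : List Char) : (pvN1 cs).keys.Nodup :=
  PySem.Dict.nodup_keys_insert pvNuclCnt0 _ 1 (by decide)

lemma pv_N1_mem (cs : List Char) (v : String) (hv : v ∈ pvNuclList) : v ∈ (pvN1 cs).keys := by
  apply (PySem.Dict.mem_keys_insert pvNuclCnt0 _ v 1).mpr
  right
  rw [show pvNuclCnt0.keys = pvNuclList from by decide]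
  exact hv

lemma pv_NA_eq_NB (cs : List Char) (hok : pvOK cs) : pvNA cs = pvNB cs := by
  apply PySem.Dict.ext
  have hnodA : (pvNA cs).keys.Nodup := by
    unfold pvNA
    exact PySem.Dict.nodup_keys_foldl_modify_key ((pvP cs).map (·.2)) (fun y => y) 0
      (fun _ _ => (· + 1)) (pvN1 cs) (pv_N1_nodup cs)
  have hnodB : (pvNB cs).keys.Nodup := by
    unfold pvNB
    exact PySem.Dict.nodup_keys_foldl_modify_key pvNuclList (fun y => y) 0
      (fun _ y => (· + (pvNuclList.map
        (fun x => ((pvDB cs).getD x PySem.Dict.empty).getD y 0)).sum)) (pvN1 cs) (pv_N1_nodup cs)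
  have hKeysA : (pvNA cs).keys = (pvN1 cs).keys := by
    have h : (pvNA cs).keys
        = PySem.Set.update (pvN1 cs).keys (((pvP cs).map (·.2)).map (fun y => y)) := by
      unfold pvNA
      exact PySem.Dict.keys_foldl_modify_key ((pvP cs).map (·.2)) (fun y => y) 0
        (fun _ _ => (· + 1)) (pvN1 cs)
    rw [List.map_id'] at h
    rw [h]
    apply pv_update_subset
    intro v hv
    rcases List.mem_map.mp hv with ⟨p, hp, rfl⟩
    exact pv_N1_mem cs _ (hok p hp).2
  have hKeysB : (pvNB cs).keys = (pvN1 cs).keys := by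
    have h : (pvNB cs).keys = PySem.Set.update (pvN1 cs).keys pvNuclList := by
      have h2 : pvNuclList = pvNuclList.map (fun y => y) := by simp
      unfold pvNB
      conv_rhs => rw [h2]
      exact PySem.Dict.keys_foldl_modify_key pvNuclList (fun y => y) 0
        (fun _ y => (· + (pvNuclList.map
          (fun x => ((pvDB cs).getD x PySem.Dict.empty).getD y 0)).sum)) (pvN1 cs)
    rw [h]
    apply pv_update_subset
    intro v hv
    exact pv_N1_mem cs v hv
  rw [PySem.Dict.items_eq_map_keys _ hnodA 0, PySem.Dict.items_eq_map_keys _ hnodB 0,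
    hKeysA, hKeysB]
  apply List.map_congr_left
  intro v _
  -- pointwise values
  have hA : (pvNA cs).getD v 0
      = (pvN1 cs).getD v 0 + (((pvP cs).map (·.2)).count v : Int) := by
    unfold pvNA
    exact PySem.Dict.getD_foldl_modify_add_one ((pvP cs).map (·.2)) (pvN1 cs) v
  have hB : (pvNB cs).getD v 0
      = (pvN1 cs).getD v 0 + (if v ∈ pvNuclList then
          (pvNuclList.map (fun x => ((pvDB cs).getD x PySem.Dict.empty).getD v 0)).sum else 0) := by
    unfold pvNB
    exact pv_getD_foldl_modify_addg pvNuclList (by decide)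
      (fun y => (pvNuclList.map (fun x => ((pvDB cs).getD x PySem.Dict.empty).getD y 0)).sum)
      (pvN1 cs) v
  rw [hA, hB]
  by_cases hv : v ∈ pvNuclList
  · rw [if_pos hv]
    have hcell : ∀ x ∈ pvNuclList,
        ((pvDB cs).getD x PySem.Dict.empty).getD v 0
          = (((pvP cs).filter (fun p => p.1 == x)).map (·.2)).count v := by
      intro x hx
      rw [pv_DB_getD cs x hx, PySem.Dict.getD_foldl_modify_add_one]
      have h0 : (pvDinucl0.getD x PySem.Dict.empty).getD v 0 = 0 := by
        fin_cases hx <;> fin_cases hv <;> decide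
      rw [h0, zero_add]
    rw [List.map_congr_left hcell,
      pv_sum_cnt2 pvNuclList (by decide) (pvP cs) (fun p hp => (hok p hp).1) v]
  · rw [if_neg hv]
    have : ((pvP cs).map (·.2)).count v = 0 := by
      apply List.count_eq_zero.mpr
      intro hmem
      rcases List.mem_map.mp hmem with ⟨p, hp, rfl⟩
      exact hv (hok p hp).2
    rw [this]
    simp

lemma pv_bridgeA (cs : List Char) (a : PySem.Dict String (List String))
    (b : PySem.Dict String Int) (c : PySem.Dict String (PySem.Dict String Int)) :
    (PySem.List.pyRange 0 ((cs.length : Int) - 1) 1).foldl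
        (fun (st : PySem.Dict String (List String) × PySem.Dict String Int ×
                   PySem.Dict String (PySem.Dict String Int)) i =>
          (st.1.modify (pvKey (PySem.List.pyGetD cs i ' ')) []
              (· ++ [pvKey (PySem.List.pyGetD cs (i + 1) ' ')]),
           st.2.1.modify (pvKey (PySem.List.pyGetD cs (i + 1) ' ')) 0 (· + 1),
           st.2.2.modify (pvKey (PySem.List.pyGetD cs i ' ')) PySem.Dict.empty
              (fun m => m.modify (pvKey (PySem.List.pyGetD cs (i + 1) ' ')) 0 (· + 1))))
        (a, b, c)
      = ((cs.zip cs.tail).foldl (fun d p => d.modify (pvKey p.1) [] (· ++ [pvKey p.2])) a,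
         (cs.zip cs.tail).foldl (fun d p => d.modify (pvKey p.2) 0 (· + 1)) b,
         (cs.zip cs.tail).foldl (fun d p => d.modify (pvKey p.1) PySem.Dict.empty
            (fun m => m.modify (pvKey p.2) 0 (· + 1))) c) :=
  (pv_foldl_range_pairs cs
      (fun st x y =>
        (st.1.modify (pvKey x) [] (· ++ [pvKey y]),
         st.2.1.modify (pvKey y) 0 (· + 1),
         st.2.2.modify (pvKey x) PySem.Dict.empty (fun m => m.modify (pvKey y) 0 (· + 1))))
      (a, b, c)).trans
    (pv_foldl_triple (cs.zip cs.tail)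
      (fun d p => d.modify (pvKey p.1) [] (· ++ [pvKey p.2]))
      (fun d p => d.modify (pvKey p.2) 0 (· + 1))
      (fun d p => d.modify (pvKey p.1) PySem.Dict.empty
        (fun m => m.modify (pvKey p.2) 0 (· + 1))) a b c)

lemma pv_bridgeB (K : List String) (L : String → List String)
    (d : PySem.Dict String (PySem.Dict String Int)) :
    K.foldl (fun d x => (L x).foldl
        (fun d y => d.modify x PySem.Dict.empty (fun m => m.modify y 0 (· + 1))) d) d
      = (K.flatMap (fun x => (L x).map (fun y => (x, y)))).foldl
          (fun d p => d.modify p.1 PySem.Dict.empty (fun m => m.modify p.2 0 (· + 1))) d := by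
  induction K generalizing d with
  | nil => rfl
  | cons k t ih =>
    rw [List.flatMap_cons, List.foldl_append, List.foldl_cons, ih, List.foldl_map]

lemma pv_portA_eq (s : String) :
    computeCountAndLists s
      = ((pvNA (PySem.Chars.upper s.toList)).items,
         (pvDA (PySem.Chars.upper s.toList)).items.map (fun p => (p.1, p.2.items)),
         (pvLst (PySem.Chars.upper s.toList)).items) := by
  simp only [computeCountAndLists, pvNA, pvDA, pvLst, pvP, pvN1, List.foldl_map, List.map_map]
  rw [pv_bridgeA]
  rfl

lemma pv_portB_eq (s : String) :
    computeCountAndLists_alt s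
      = ((pvNB (PySem.Chars.upper s.toList)).items,
         (pvDB (PySem.Chars.upper s.toList)).items.map (fun p => (p.1, p.2.items)),
         (pvLst (PySem.Chars.upper s.toList)).items) := by
  simp only [computeCountAndLists_alt, pvNB, pvDB, pvQ, pvLst, pvP, pvN1, List.foldl_map]
  rw [pv_bridgeB]
  rfl

lemma pv_pre_ok (s : String) (hpre : Pre_computeCountAndLists s) :
    pvOK (PySem.Chars.upper s.toList) := by
  rcases hpre with ⟨-, hcase⟩
  intro p hp
  rcases hcase with hlen | hall
  · exfalso
    rcases List.length_eq_one_iff.mp hlen with ⟨c, hc⟩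
    rw [pvP, hc] at hp
    simp at hp
  · rcases List.mem_map.mp hp with ⟨q, hq, rfl⟩
    obtain ⟨a, b⟩ := q
    have hab := List.of_mem_zip hq
    have hmem : ∀ c ∈ PySem.Chars.upper s.toList, pvKey c ∈ pvNuclList := by
      intro c hc
      have h5 := of_decide_eq_true (List.all_eq_true.mp hall c hc)
      fin_cases h5 <;> decide
    exact ⟨hmem a hab.1, hmem b (List.mem_of_mem_tail hab.2)⟩

-- ===== VERDICT (by name: the statement is the Claim_ definition above) =====
theorem computeCountAndLists_spec : Claim_equal_computeCountAndLists := by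
  intro s _ hpre
  unfold Spec_computeCountAndLists
  rw [pv_portA_eq, pv_portB_eq, pv_DA_eq_DB _ (pv_pre_ok s hpre), pv_NA_eq_NB _ (pv_pre_ok s hpre)]
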